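-- pv_equiv track=rewrite | github.com/career091101/AgentPM | Stock/programs/創業支援・新規事業開発（AIエージェント）/projects/Founder_Agent_ForSolo/Solopreneur_Research/scripts/fix_duplicates.py | remove_duplicate_quality
-- ===== SOURCE A (Python) =====
-- def remove_duplicate_quality(content):
--     """Remove duplicate quality sections, keeping the first one"""
--     lines = content.split('\n')
--     quality_count = 0
--     new_lines = []
--     skip_mode = False
--     skip_count = 0
--
--     i = 0
--     while i < len(lines):
--         line = lines[i]
--
--         # Check if this is a quality section start
--         if line.strip() == 'quality:':
--             quality_count += 1
--
--             if quality_count == 1: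
--                 # Keep the first quality section
--                 new_lines.append(line)
--                 skip_mode = False
--             else:
--                 # Skip subsequent quality sections
--                 skip_mode = True
--                 skip_count = 0
--                 # Skip until we find a non-indented line or empty line followed by ##
--                 i += 1
--                 while i < len(lines):
--                     next_line = lines[i]
--                     # If line starts with ## or is a markdown header, we're done skipping
--                     if next_line.strip().startswith('##') or (not next_line.strip().startswith(' ') and not next_line.strip().startswith('-') and next_line.strip() and not next_line.strip().startswith('quality')):
--                         break
--                     i += 1
--                 i -= 1  # Back up one because we'll increment at the end of the loop
--                 skip_mode = False
--         else:
--             if not skip_mode: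
--                 new_lines.append(line)
--
--         i += 1
--
--     return '\n'.join(new_lines)
-- ===== SOURCE B (Python) =====
-- def remove_duplicate_quality(content):
--     """Remove duplicate quality sections, keeping the first one.
--
--     Two-pass decomposition: first compute a keep/drop mask over the lines,
--     then rebuild the output from the masked lines."""
--     lines = content.split('\n')
--
--     def is_blockish(line):
--         t = line.strip()
--         return (not t) or t.startswith('-') or t.startswith('quality')
--
--     keep = []
--     seen = False
--     skipping = False
--     for line in lines:
--         if skipping and is_blockish(line):
--             keep.append(False)
--             continue
--         skipping = False
--         if line.strip() == 'quality:':
--             if seen: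
--                 skipping = True
--                 keep.append(False)
--                 continue
--             seen = True
--         keep.append(True)
--
--     return '\n'.join(l for l, k in zip(lines, keep) if k)
-- ===== Notes on version B (the rewrite author's own statement) =====
-- stated objective: alternative
-- what changed: A's single index-driven while loop with a nested skip-while and an i -= 1 back-up is replaced by two passes: a first pass computing a keep/drop boolean mask over the lines with a flag, and a second pass rebuilding the output by a filtering zip of lines with the mask.
import Mathlib
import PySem

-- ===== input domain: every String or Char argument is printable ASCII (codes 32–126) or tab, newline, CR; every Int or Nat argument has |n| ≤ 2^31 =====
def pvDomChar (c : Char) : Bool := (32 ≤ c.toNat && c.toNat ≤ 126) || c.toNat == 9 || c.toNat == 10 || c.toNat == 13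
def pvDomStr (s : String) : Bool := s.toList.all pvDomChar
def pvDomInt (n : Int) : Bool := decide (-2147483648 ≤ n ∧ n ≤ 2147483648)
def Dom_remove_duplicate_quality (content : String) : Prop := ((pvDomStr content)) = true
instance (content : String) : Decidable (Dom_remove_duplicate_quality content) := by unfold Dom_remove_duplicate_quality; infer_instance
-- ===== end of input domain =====

-- B replaces A's index loop (with its nested skip-while and i -= 1 back-up) by two passes:
-- a keep/drop mask over the lines, then a rebuild from the masked lines; same return value.

-- ===== PORT A =====
-- stop test of A's inner while (on next_line)
def pvStopA (s : String) : Bool :=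
  PySem.Str.startswith (PySem.Str.strip s) "##" ||
  (!PySem.Str.startswith (PySem.Str.strip s) " " &&
   !PySem.Str.startswith (PySem.Str.strip s) "-" &&
   !(PySem.Str.strip s == "") &&
   !PySem.Str.startswith (PySem.Str.strip s) "quality")

-- A's inner while: advance i past lines until the stop test; the stop line is re-processed
-- (Python's i -= 1 before the outer i += 1), so it stays at the head of the remaining list.
def pvSkipA : List String → List String
  | [] => []
  | l :: rest => if pvStopA l then l :: rest else pvSkipA rest

lemma pvSkipA_length_le (ls : List String) : (pvSkipA ls).length ≤ ls.length := by
  induction ls with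
  | nil => simp [pvSkipA]
  | cons l rest ih =>
    simp only [pvSkipA]
    split
    · simp
    · exact Nat.le_succ_of_le ih

-- A's outer while loop over the remaining lines, state (quality_count, skip_mode)
def pvGoA (qc : Nat) (skipMode : Bool) : List String → List String
  | [] => []
  | l :: rest =>
    if PySem.Str.strip l == "quality:" then
      if qc + 1 == 1 then l :: pvGoA (qc + 1) false rest
      else pvGoA (qc + 1) false (pvSkipA rest)
    else
      if skipMode then pvGoA qc skipMode rest
      else l :: pvGoA qc skipMode rest
termination_by ls => ls.length
decreasing_by
  · simp
  · exact Nat.lt_succ_of_le (pvSkipA_length_le rest)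
  · simp
  · simp

def remove_duplicate_quality (content : String) : String :=
  PySem.Str.join "\n"
    ((PySem.Chars.splitOn content.toList ['\n']).map String.ofList |> pvGoA 0 false)

-- ===== PORT B =====
-- B's is_blockish helper
def pvBlockish (s : String) : Bool :=
  (PySem.Str.strip s == "") ||
  PySem.Str.startswith (PySem.Str.strip s) "-" ||
  PySem.Str.startswith (PySem.Str.strip s) "quality"

-- B's first pass: keep/drop mask, state (seen, skipping)
def pvMaskB (seen skipping : Bool) : List String → List Bool
  | [] => []
  | l :: rest =>
    if skipping && pvBlockish l then false :: pvMaskB seen skipping rest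
    else
      if PySem.Str.strip l == "quality:" then
        if seen then false :: pvMaskB seen true rest
        else true :: pvMaskB true false rest
      else true :: pvMaskB seen false rest

-- B's second pass: the filtering zip comprehension
def pvApplyMask : List String → List Bool → List String
  | l :: ls, k :: ks => if k then l :: pvApplyMask ls ks else pvApplyMask ls ks
  | _, _ => []

def remove_duplicate_quality_alt (content : String) : String :=
  let lines := (PySem.Chars.splitOn content.toList ['\n']).map String.ofList
  PySem.Str.join "\n" (pvApplyMask lines (pvMaskB false false lines))

-- ===== PRECONDITION & SPEC =====
def Spec_remove_duplicate_quality (content : String) (out : String) : Prop := out = remove_duplicate_quality_alt content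
instance (content : String) (out : String) : Decidable (Spec_remove_duplicate_quality content out) := by unfold Spec_remove_duplicate_quality; infer_instance

-- ===== CLAIM (what is proved, stated in full; the proofs are below) =====
def Claim_equal_remove_duplicate_quality : Prop := ∀ (content : String), Dom_remove_duplicate_quality content → Spec_remove_duplicate_quality content (remove_duplicate_quality content)

-- ===== LEMMAS AND PROOFS =====

-- a stripped string never starts with a space
lemma strip_not_startswith_space (s : String) :
    PySem.Str.startswith (PySem.Str.strip s) " " = false := by
  simp only [PySem.Str.startswith, PySem.Str.strip, String.toList_ofList]
  have h : " ".toList = [' '] := rfl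
  rw [h]
  simp only [PySem.Chars.strip, PySem.Chars.rstrip, PySem.Chars.lstrip]
  set t := List.dropWhile PySem.Chars.isspace s.toList with ht
  by_contra hc
  rw [Bool.not_eq_false] at hc
  have hpre : [' '] <+: (List.dropWhile PySem.Chars.isspace t.reverse).reverse :=
    (PySem.Chars.startswith_iff _ _).mp hc
  have hsuf : (List.dropWhile PySem.Chars.isspace t.reverse) <:+ t.reverse := List.dropWhile_suffix _
  have hpre2 : (List.dropWhile PySem.Chars.isspace t.reverse).reverse <+: t := by
    have := hsuf.reverse
    simpa using this
  obtain ⟨u, hu⟩ := hpre.trans hpre2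
  have hsp : PySem.Chars.isspace ' ' = false := by
    have hh := List.head?_dropWhile_not PySem.Chars.isspace s.toList
    rw [← ht, ← hu] at hh
    simpa using hh
  simp [PySem.Chars.isspace] at hsp

-- A's stop test is exactly the negation of B's is_blockish
lemma pvStopA_eq_not_blockish (s : String) : pvStopA s = !pvBlockish s := by
  unfold pvStopA pvBlockish
  rw [strip_not_startswith_space]
  set t := PySem.Str.strip s with ht
  cases hu : t.toList with
  | nil =>
    have he : (t == "") = true := by
      simp only [beq_iff_eq]; exact String.toList_eq_nil_iff.mp hu
    simp [PySem.Str.startswith, PySem.Chars.startswith, hu, he]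
  | cons c u' =>
    have he : (t == "") = false := by
      simp only [beq_eq_false_iff_ne, ne_eq]
      intro h; rw [h] at hu; simp at hu
    simp only [PySem.Str.startswith, PySem.Chars.startswith, hu, he]
    show (List.isPrefixOf ['#','#'] (c :: u') || _) = _
    simp only [List.isPrefixOf, Bool.not_false, Bool.true_and, Bool.false_or]
    by_cases h1 : c = '#' <;> by_cases h2 : c = '-' <;> by_cases h3 : c = 'q' <;>
      simp_all [List.isPrefixOf] <;> exact fun h _ => absurd h.symm h1

-- a non-blockish line is never a bare 'quality:' line
lemma not_quality_of_not_blockish (s : String) (h : pvBlockish s = false) :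
    (PySem.Str.strip s == "quality:") = false := by
  by_contra hc
  rw [Bool.not_eq_false, beq_iff_eq] at hc
  unfold pvBlockish at h
  rw [hc] at h
  simp [PySem.Str.startswith, PySem.Chars.startswith] at h

lemma main_invariant (n : Nat) : ∀ ls : List String, ls.length ≤ n →
    (∀ qc : Nat, 1 ≤ qc →
      pvGoA qc false (pvSkipA ls) = pvApplyMask ls (pvMaskB true true ls)) ∧
    (∀ qc : Nat,
      pvGoA qc false ls = pvApplyMask ls (pvMaskB (decide (1 ≤ qc)) false ls)) := by
  induction n with
  | zero =>
    intro ls hlen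
    have : ls = [] := List.eq_nil_of_length_eq_zero (Nat.le_zero.mp hlen)
    subst this
    simp [pvSkipA, pvGoA, pvApplyMask]
  | succ n ih =>
    intro ls hlen
    cases ls with
    | nil => simp [pvSkipA, pvGoA, pvApplyMask]
    | cons l r =>
      have hr : r.length ≤ n := Nat.le_of_succ_le_succ (by simpa using hlen)
      obtain ⟨ihA, ihB⟩ := ih r hr
      constructor
      · intro qc hqc
        by_cases hb : pvBlockish l = true
        · have hs : pvStopA l = false := by rw [pvStopA_eq_not_blockish, hb]; rfl
          simp only [pvSkipA, hs, Bool.false_eq_true, if_false, pvMaskB, hb, Bool.and_true,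
            if_true, pvApplyMask, Bool.false_eq_true]
          exact ihA qc hqc
        · have hb' : pvBlockish l = false := by simpa using hb
          have hs : pvStopA l = true := by rw [pvStopA_eq_not_blockish, hb']; rfl
          have hq : (PySem.Str.strip l == "quality:") = false := not_quality_of_not_blockish l hb'
          have hd : decide (1 ≤ qc) = true := decide_eq_true hqc
          simp only [pvSkipA, hs, if_true, pvGoA, hq, Bool.false_eq_true, if_false, pvMaskB,
            hb', Bool.and_false, pvApplyMask, if_true]
          rw [ihB qc, hd]
      · intro qc
        by_cases hq : (PySem.Str.strip l == "quality:") = true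
        · by_cases h1 : 1 ≤ qc
          · have hqc1 : (qc + 1 == 1) = false := by simp; omega
            have hd : decide (1 ≤ qc) = true := decide_eq_true h1
            simp only [pvGoA, hq, if_true, hqc1, Bool.false_eq_true, if_false, pvMaskB, hd,
              Bool.false_and, Bool.false_eq_true, pvApplyMask]
            exact ihA (qc + 1) (by omega)
          · have hqc0 : qc = 0 := by omega
            subst hqc0
            have hd : decide (1 ≤ 0) = false := by decide
            simp only [pvGoA, hq, if_true, pvMaskB, hd, Bool.false_and, Bool.false_eq_true,
              if_false, pvApplyMask]
            have h2 := ihB 1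
            rw [show decide (1 ≤ 1) = true from rfl] at h2
            norm_num [h2]
        · have hq' : (PySem.Str.strip l == "quality:") = false := by simpa using hq
          simp only [pvGoA, hq', Bool.false_eq_true, if_false, pvMaskB, Bool.false_and,
            pvApplyMask, if_true]
          rw [ihB qc]

-- ===== VERDICT (by name: the statement is the Claim_ definition above) =====
theorem remove_duplicate_quality_spec : Claim_equal_remove_duplicate_quality := by
  intro content _
  unfold Spec_remove_duplicate_quality remove_duplicate_quality remove_duplicate_quality_alt
  have h := (main_invariant ((PySem.Chars.splitOn content.toList ['\n']).map String.ofList).length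
      ((PySem.Chars.splitOn content.toList ['\n']).map String.ofList) le_rfl).2 0
  simp only [h]
  rfl
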